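-- pv_equiv track=rewrite | github.com/Veeresh-Hanni/learn_computer_science_and_its_legacy | Python/DataStructures/Time_Complexity/time_complexity_demo.py | find_common_friends
-- ===== SOURCE A (Python) =====
-- def find_common_friends(
--     friend_list1: list,
--     friend_list2: list,
-- ) -> list:
--     """
--     O(n^2) - Quadratic Time
--     Finds common friends between two lists of friends IDs.
--     """
--     common_friends = []  # initialize empty list
--     for friend1 in friend_list1:
--         for friend2 in friend_list2:
--             if friend1 == friend2:
--                 common_friends.append(friend1)
--
--     return common_friends
-- ===== SOURCE B (Python) =====
-- def _first_not(s, pred):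
--     """First index i in sorted s with not pred(s[i]) (binary search)."""
--     lo, hi = 0, len(s)
--     while lo < hi:
--         mid = (lo + hi) // 2
--         if pred(s[mid]):
--             lo = mid + 1
--         else:
--             hi = mid
--     return lo
--
--
-- def find_common_friends(
--     friend_list1: list,
--     friend_list2: list,
-- ) -> list:
--     """
--     Sorts friend_list2 once, then for each friend in friend_list1
--     binary-searches the equal range [lo, hi) in the sorted list and
--     emits the friend hi - lo times.
--     """
--     s = sorted(friend_list2)
--     common_friends = []
--     for f in friend_list1:
--         lo = _first_not(s, lambda y: y < f)
--         hi = _first_not(s, lambda y: y <= f)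
--         common_friends += [f] * (hi - lo)
--     return common_friends
-- ===== Notes on version B (the rewrite author's own statement) =====
-- stated objective: alternative
-- what changed: replaces A's nested scan with a sort of friend_list2 done once plus, per element of friend_list1, a hand-written binary search for the equal range [bisect_left, bisect_right) in the sorted list, emitting the element that many times
import Mathlib
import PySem

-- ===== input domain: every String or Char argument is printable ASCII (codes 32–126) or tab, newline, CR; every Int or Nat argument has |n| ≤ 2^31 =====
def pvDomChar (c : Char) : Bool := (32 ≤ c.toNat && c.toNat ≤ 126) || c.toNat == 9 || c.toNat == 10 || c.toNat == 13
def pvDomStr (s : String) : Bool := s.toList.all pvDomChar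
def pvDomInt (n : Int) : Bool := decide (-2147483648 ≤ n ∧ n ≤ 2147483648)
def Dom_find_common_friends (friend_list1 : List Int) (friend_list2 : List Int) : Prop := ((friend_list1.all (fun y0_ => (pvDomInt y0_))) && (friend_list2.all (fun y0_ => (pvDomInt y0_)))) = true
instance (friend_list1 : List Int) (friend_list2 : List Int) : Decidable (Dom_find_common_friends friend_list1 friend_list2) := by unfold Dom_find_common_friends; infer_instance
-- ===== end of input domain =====

-- B replaces A's nested scan by sorting friend_list2 once and binary-searching the equal range per friend (objective: alternative algorithm).

-- ===== PORT A =====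
def find_common_friends (friend_list1 : List Int) (friend_list2 : List Int) : List Int :=
  friend_list1.foldl (fun acc friend1 =>
    friend_list2.foldl (fun acc friend2 =>
      if friend1 == friend2 then acc ++ [friend1] else acc) acc) []

-- ===== PORT B =====
-- hand port of Source B's _first_not: while lo < hi binary-search loop; s[mid] is
-- ported as s.getD mid 0, exact because 0 ≤ lo ≤ mid < hi ≤ len(s) throughout.
def pvFirstNot (s : List Int) (p : Int → Bool) (lo hi : Nat) : Nat :=
  if _h : lo < hi then
    let mid := (lo + hi) / 2
    if p (s.getD mid 0) then pvFirstNot s p (mid + 1) hi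
    else pvFirstNot s p lo mid
  else lo
termination_by hi - lo
decreasing_by all_goals omega

def find_common_friends_alt (friend_list1 : List Int) (friend_list2 : List Int) : List Int :=
  let s := PySem.List.sorted friend_list2 (fun x => x) false
  friend_list1.foldl (fun acc f =>
    let lo := pvFirstNot s (fun y => decide (y < f)) 0 s.length
    let hi := pvFirstNot s (fun y => decide (y ≤ f)) 0 s.length
    acc ++ List.replicate (hi - lo) f) []

-- ===== PRECONDITION & SPEC =====
def Spec_find_common_friends (friend_list1 : List Int) (friend_list2 : List Int) (out : List Int) : Prop := out = find_common_friends_alt friend_list1 friend_list2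
instance (friend_list1 : List Int) (friend_list2 : List Int) (out : List Int) : Decidable (Spec_find_common_friends friend_list1 friend_list2 out) := by unfold Spec_find_common_friends; infer_instance

-- ===== CLAIM (what is proved, stated in full; the proofs are below) =====
def Claim_equal_find_common_friends : Prop := ∀ (friend_list1 : List Int) (friend_list2 : List Int), Dom_find_common_friends friend_list1 friend_list2 → Spec_find_common_friends friend_list1 friend_list2 (find_common_friends friend_list1 friend_list2)

-- ===== LEMMAS AND PROOFS =====

-- A's inner loop appends friend1 once per equal element of friend_list2
lemma inner_loop_eq (f : Int) (l2 : List Int) (acc : List Int) :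
    l2.foldl (fun acc y => if f == y then acc ++ [f] else acc) acc
      = acc ++ List.replicate (l2.count f) f := by
  induction l2 generalizing acc with
  | nil => simp
  | cons y t ih =>
    simp only [List.foldl_cons, List.count_cons, ih]
    by_cases h : y = f
    · simp [h, List.replicate_succ]
    · have h' : ¬ (f = y) := fun e => h e.symm
      simp [h, h']

lemma outer_loop_eq (l1 l2 : List Int) (acc : List Int) :
    l1.foldl (fun acc f1 =>
      l2.foldl (fun acc f2 => if f1 == f2 then acc ++ [f1] else acc) acc) acc
      = l1.foldl (fun acc f => acc ++ List.replicate (l2.count f) f) acc := by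
  induction l1 generalizing acc with
  | nil => rfl
  | cons x t ih => simp only [List.foldl_cons, inner_loop_eq]

-- binary-search invariant: if p holds strictly before lo and fails from hi on,
-- the loop returns the boundary index r: p holds exactly on indices < r.
lemma pvFirstNot_inv (s : List Int) (p : Int → Bool)
    (hmono : ∀ i j : Nat, i ≤ j → j < s.length →
      p (s.getD j 0) = true → p (s.getD i 0) = true) :
    ∀ (n lo hi : Nat), hi - lo = n → lo ≤ hi → hi ≤ s.length →
    (∀ i, i < lo → p (s.getD i 0) = true) →
    (∀ i, hi ≤ i → i < s.length → p (s.getD i 0) = false) →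
    pvFirstNot s p lo hi ≤ s.length ∧
    (∀ i, i < pvFirstNot s p lo hi → p (s.getD i 0) = true) ∧
    (∀ i, pvFirstNot s p lo hi ≤ i → i < s.length → p (s.getD i 0) = false) := by
  intro n
  induction n using Nat.strong_induction_on with
  | _ n ih =>
    intro lo hi hn hle hhi hpre hpost
    rw [pvFirstNot]
    by_cases hlt : lo < hi
    · simp only [hlt, dif_pos]
      set mid := (lo + hi) / 2 with hmid
      have hmlo : lo ≤ mid := by omega
      have hmhi : mid < hi := by omega
      by_cases hp : p (s.getD mid 0) = true
      · simp only [hp, if_pos]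
        refine ih (hi - (mid + 1)) (by omega) (mid + 1) hi (by omega) (by omega) hhi ?_ hpost
        intro i hi'
        by_cases hlo' : i < lo
        · exact hpre i hlo'
        · exact hmono i mid (by omega) (by omega) hp
      · simp only [hp]
        refine ih (mid - lo) (by omega) lo mid rfl hmlo (by omega) hpre ?_
        intro i hge hlen
        by_cases hge' : hi ≤ i
        · exact hpost i hge' hlen
        · by_cases hq : p (s.getD i 0) = true
          · exact absurd (hmono mid i hge (by omega) hq) (by simpa using hp)
          · simpa using hq
    · simp only [hlt, dif_neg, not_false_iff]
      have : lo = hi ∨ lo < hi := by omega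
      refine ⟨by omega, ?_, ?_⟩
      · intro i hi'; exact hpre i (by omega)
      · intro i hge hlen; exact hpost i (by omega) hlen

-- a predicate true exactly on the first r indices has countP = r
lemma countP_of_prefix (s : List Int) (p : Int → Bool) (r : Nat) (hr : r ≤ s.length)
    (htrue : ∀ i, i < r → p (s.getD i 0) = true)
    (hfalse : ∀ i, r ≤ i → i < s.length → p (s.getD i 0) = false) :
    s.countP p = r := by
  induction s generalizing r with
  | nil =>
    have : r = 0 := by simpa using hr
    simp [this]
  | cons x t ihs =>
    cases r with
    | zero =>
      simp only [List.countP_cons]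
      have hx : p x = false := by simpa using hfalse 0 (Nat.zero_le _) (by simp)
      have ht : t.countP p = 0 := by
        refine ihs 0 (Nat.zero_le _) (fun i hi => by omega) ?_
        intro i _ hlen
        simpa using hfalse (i + 1) (by omega) (by simpa using Nat.succ_lt_succ hlen)
      simp [ht, hx]
    | succ r' =>
      have hx : p x = true := by simpa using htrue 0 (Nat.succ_pos _)
      have ht : t.countP p = r' := by
        refine ihs r' (by simpa using hr) ?_ ?_
        · intro i hi; simpa using htrue (i + 1) (by omega)
        · intro i hge hlen
          simpa using hfalse (i + 1) (by omega) (by simpa using Nat.succ_lt_succ hlen)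
      simp [hx, ht]

lemma countP_le_split (s : List Int) (f : Int) :
    s.countP (fun y => decide (y ≤ f))
      = s.countP (fun y => decide (y < f)) + s.count f := by
  induction s with
  | nil => simp
  | cons x t ih =>
    simp only [List.countP_cons, List.count_cons, ih]
    by_cases h1 : x < f
    · have h2 : x ≤ f := le_of_lt h1
      have h3 : ¬ (x = f) := ne_of_lt h1
      simp [h1, h2, h3]; omega
    · by_cases h4 : x = f
      · simp [h4]; omega
      · have h5 : ¬ (x ≤ f) := by
          rcases lt_trichotomy x f with h | h | h
          · exact absurd h h1
          · exact absurd h h4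
          · omega
        simp [h1, h4, h5]

-- getD-monotonicity of the sorted list
lemma sorted_getD_mono (l2 : List Int) (i j : Nat) (hij : i ≤ j)
    (hj : j < (PySem.List.sorted l2 (fun x => x) false).length) :
    (PySem.List.sorted l2 (fun x => x) false).getD i 0
      ≤ (PySem.List.sorted l2 (fun x => x) false).getD j 0 := by
  have hi : i < (PySem.List.sorted l2 (fun x => x) false).length := by omega
  rw [List.getD_eq_getElem _ _ hi, List.getD_eq_getElem _ _ hj]
  exact PySem.List.sorted_id_getElem_mono l2 hij hj

-- the binary-searched range length is the count of f in friend_list2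
lemma range_len_eq_count (l2 : List Int) (f : Int) :
    (pvFirstNot (PySem.List.sorted l2 (fun x => x) false) (fun y => decide (y ≤ f)) 0
        (PySem.List.sorted l2 (fun x => x) false).length)
      - (pvFirstNot (PySem.List.sorted l2 (fun x => x) false) (fun y => decide (y < f)) 0
        (PySem.List.sorted l2 (fun x => x) false).length)
      = l2.count f := by
  set s := PySem.List.sorted l2 (fun x => x) false with hs
  have hlt := pvFirstNot_inv s (fun y => decide (y < f))
    (fun i j hij hj hp => by
      have hm := sorted_getD_mono l2 i j hij (hs ▸ hj)
      rw [← hs] at hm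
      simp only [decide_eq_true_eq] at hp ⊢
      omega)
    s.length 0 s.length rfl (Nat.zero_le _) le_rfl
    (fun i hi => absurd hi (Nat.not_lt_zero i))
    (fun i hge hlen => absurd hlen (by omega))
  have hle := pvFirstNot_inv s (fun y => decide (y ≤ f))
    (fun i j hij hj hp => by
      have hm := sorted_getD_mono l2 i j hij (hs ▸ hj)
      rw [← hs] at hm
      simp only [decide_eq_true_eq] at hp ⊢
      omega)
    s.length 0 s.length rfl (Nat.zero_le _) le_rfl
    (fun i hi => absurd hi (Nat.not_lt_zero i))
    (fun i hge hlen => absurd hlen (by omega))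
  have h1 : s.countP (fun y => decide (y < f))
      = pvFirstNot s (fun y => decide (y < f)) 0 s.length :=
    countP_of_prefix s _ _ hlt.1 hlt.2.1 hlt.2.2
  have h2 : s.countP (fun y => decide (y ≤ f))
      = pvFirstNot s (fun y => decide (y ≤ f)) 0 s.length :=
    countP_of_prefix s _ _ hle.1 hle.2.1 hle.2.2
  have hcount : s.count f = l2.count f :=
    (PySem.List.sorted_perm l2 (fun x => x) false).count_eq f
  have := countP_le_split s f
  omega

-- ===== VERDICT (by name: the statement is the Claim_ definition above) =====
theorem find_common_friends_spec : Claim_equal_find_common_friends := by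
  intro l1 l2 _
  unfold Spec_find_common_friends find_common_friends find_common_friends_alt
  rw [outer_loop_eq]
  apply PySem.List.foldl_congr_mem
  intro acc f _
  simp only [range_len_eq_count]
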